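-- pv_equiv track=rewrite | github.com/Jayesh-Ah/LeetCode-Prob | School/Count Digits/count-digits.py | count_divisible_digits
-- ===== SOURCE A (Python) =====
-- def count_divisible_digits(N):
--     # Convert the number to a string to iterate through its digits
--     N_str = str(N)
--
--     # Initialize a counter for divisible digits
--     count = 0
--
--     # Iterate through each digit in the number
--     for digit_str in N_str:
--         # Convert the digit back to an integer
--         digit = int(digit_str)
--
--         # Check if the digit is not zero and evenly divides N
--         if digit != 0 and N % digit == 0:
--             count += 1
--
--     return count
-- ===== SOURCE B (Python) =====
-- def count_divisible_digits(N):
--     count = 0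
--     n = abs(N)
--     while n:
--         n, d = divmod(n, 10)
--         if d != 0 and N % d == 0:
--             count += 1
--     return count
-- ===== Notes on version B (the rewrite author's own statement) =====
-- stated objective: alternative
-- what changed: B peels digits arithmetically with divmod from a working copy of abs(N) instead of converting N to a string and re-parsing each character with int().
import Mathlib
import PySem

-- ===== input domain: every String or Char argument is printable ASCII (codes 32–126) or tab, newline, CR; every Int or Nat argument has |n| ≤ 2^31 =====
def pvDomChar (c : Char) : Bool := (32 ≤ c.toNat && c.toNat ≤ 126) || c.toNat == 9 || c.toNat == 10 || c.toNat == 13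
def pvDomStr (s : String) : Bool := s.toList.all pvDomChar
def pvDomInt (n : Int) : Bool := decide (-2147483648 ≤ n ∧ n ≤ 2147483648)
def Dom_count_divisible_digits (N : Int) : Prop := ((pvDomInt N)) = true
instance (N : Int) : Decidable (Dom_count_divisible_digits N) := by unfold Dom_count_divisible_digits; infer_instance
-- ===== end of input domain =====

-- B peels digits arithmetically with divmod from a working copy of |N| instead of
-- converting N to a string and re-parsing each character with int().


-- ===== PORT A =====
-- str(N), then for each character: digit = int(c); count nonzero digits dividing N.
-- int(digit_str) is PySem.Int.ofChars?; it is none (Python ValueError) exactly on the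
-- sign character of a negative N — those inputs are excluded by Pre_, the .getD 0
-- default is never reached inside Pre_.
def count_divisible_digits (N : Int) : Int :=
  (PySem.Int.toChars N).foldl
    (fun count digit_str =>
      let digit : Int := (PySem.Int.ofChars? [digit_str]).getD 0
      if digit ≠ 0 ∧ PySem.Int.mod N digit = 0 then count + 1 else count) 0

-- ===== PORT B =====
-- the 'while n:' loop of Source B; n = abs(N) is nonnegative throughout, so it is carried
-- as a Nat; divmod(n, 10) on a nonnegative n is exactly (n / 10, n % 10) on Nat.
-- 'fuel' is only a structural-termination device: fuel = n always suffices because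
-- n strictly shrinks (n / 10 < n for n ≠ 0), so the 0-fuel branch is never taken.
def count_divisible_digits_altLoop (N : Int) (fuel n : Nat) : Int :=
  match fuel with
  | 0 => 0
  | fuel + 1 =>
    if n = 0 then 0
    else
      let d : Int := ((n % 10 : Nat) : Int)
      (if d ≠ 0 ∧ PySem.Int.mod N d = 0 then 1 else 0) + count_divisible_digits_altLoop N fuel (n / 10)

def count_divisible_digits_alt (N : Int) : Int :=
  count_divisible_digits_altLoop N N.natAbs N.natAbs

-- ===== PRECONDITION & SPEC =====
-- Pre_ excludes exactly the negative N, on which A raises ValueError (int('-')).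
def Pre_count_divisible_digits (N : Int) : Prop := 0 ≤ N
instance (N : Int) : Decidable (Pre_count_divisible_digits N) := by unfold Pre_count_divisible_digits; infer_instance
def pvWitness_count_divisible_digits : Int := (1012)

def Spec_count_divisible_digits (N : Int) (out : Int) : Prop := out = count_divisible_digits_alt N
instance (N : Int) (out : Int) : Decidable (Spec_count_divisible_digits N out) := by unfold Spec_count_divisible_digits; infer_instance

-- ===== CLAIM (what is proved, stated in full; the proofs are below) =====
def Claim_equal_count_divisible_digits : Prop := ∀ (N : Int), Dom_count_divisible_digits N → Pre_count_divisible_digits N → Spec_count_divisible_digits N (count_divisible_digits N)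

-- ===== LEMMAS AND PROOFS =====

-- int(c) of a single decimal digit character is that digit's value
theorem pv_digitVal (d : Nat) (hd : d < 10) :
    (PySem.Int.ofChars? [Nat.digitChar d]).getD 0 = (d : Int) := by
  interval_cases d <;> decide

-- Nat.toDigitsCore with enough fuel writes the base-10 digits, most significant first
theorem pv_toDigitsCore_eq (f : Nat) : ∀ (n : Nat) (acc : List Char), 0 < n → n < 10 ^ f →
    Nat.toDigitsCore 10 f n acc = ((Nat.digits 10 n).map Nat.digitChar).reverse ++ acc := by
  induction f with
  | zero => intro n acc h1 h2; omega
  | succ f ih =>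
    intro n acc h1 h2
    rw [Nat.toDigitsCore]
    rw [Nat.digits_def' (by norm_num) h1]
    by_cases hdiv : n / 10 = 0
    · have hlt : n < 10 := by omega
      simp [hdiv, Nat.mod_eq_of_lt hlt]
    · simp only [hdiv, if_false]
      rw [ih (n / 10) _ (by omega)
        (Nat.div_lt_of_lt_mul (by rw [pow_succ, mul_comm] at h2; exact h2))]
      simp

-- str(n) for a nonnegative n, as digits
theorem pv_toDigits_eq (n : Nat) :
    Nat.toDigits 10 n = if n = 0 then ['0'] else ((Nat.digits 10 n).map Nat.digitChar).reverse := by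
  by_cases h : n = 0
  · subst h; decide
  · rw [if_neg h, Nat.toDigits]
    rw [pv_toDigitsCore_eq (n + 1) n [] (by omega)
      (lt_of_lt_of_le (Nat.lt_pow_self (by norm_num)) (Nat.pow_le_pow_right (by norm_num) (by omega)))]
    simp

-- B's loop sums the digit indicator over the little-endian digit list
theorem pv_altLoop_eq (N : Int) (fuel : Nat) : ∀ n : Nat, n ≤ fuel →
    count_divisible_digits_altLoop N fuel n =
      ((Nat.digits 10 n).map (fun d : Nat => if (d : Int) ≠ 0 ∧ PySem.Int.mod N (d : Int) = 0 then (1 : Int) else 0)).sum := by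
  induction fuel with
  | zero => intro n hn; simp [count_divisible_digits_altLoop, Nat.le_zero.mp hn]
  | succ fuel ih =>
    intro n hn
    rw [count_divisible_digits_altLoop]
    by_cases h : n = 0
    · simp [h]
    · rw [if_neg h, Nat.digits_def' (b := 10) (by norm_num) (by omega),
        ih (n / 10) (by omega)]
      simp [show ((10 : Int) ∣ (n : Int)) ↔ n % 10 = 0 from by omega]

-- A's foldl counter as a 0/1-sum over the character list
theorem pv_foldA_eq (N : Int) : ∀ (cs : List Char) (a : Int),
    cs.foldl (fun count digit_str =>
        let digit : Int := (PySem.Int.ofChars? [digit_str]).getD 0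
        if digit ≠ 0 ∧ PySem.Int.mod N digit = 0 then count + 1 else count) a
      = a + (cs.map (fun c =>
          let digit : Int := (PySem.Int.ofChars? [c]).getD 0
          if digit ≠ 0 ∧ PySem.Int.mod N digit = 0 then (1 : Int) else 0)).sum := by
  intro cs
  induction cs with
  | nil => simp
  | cons c cs ih =>
    intro a
    simp only [List.foldl_cons, List.map_cons, List.sum_cons, ih]
    split_ifs <;> ring

-- ===== VERDICT (by name: the statement is the Claim_ definition above) =====
theorem count_divisible_digits_spec : Claim_equal_count_divisible_digits := by
  intro N _ hpre
  unfold Pre_count_divisible_digits at hpre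
  unfold Spec_count_divisible_digits count_divisible_digits count_divisible_digits_alt
  rw [show PySem.Int.toChars N = Nat.toDigits 10 N.toNat from by
        simp [PySem.Int.toChars, if_neg (by omega : ¬ N < 0)],
      pv_toDigits_eq, show N.natAbs = N.toNat from by omega,
      pv_altLoop_eq N N.toNat N.toNat le_rfl, pv_foldA_eq]
  by_cases h0 : N.toNat = 0
  · have hN0 : N = 0 := by omega
    subst hN0
    decide
  · rw [if_neg h0, List.map_reverse, List.sum_reverse, List.map_map, zero_add]
    apply congrArg List.sum
    apply List.map_congr_left
    intro d hd
    have hlt : d < 10 := Nat.digits_lt_base (by norm_num) hd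
    simp [pv_digitVal d hlt]
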